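-- pv_equiv track=rewrite | github.com/rlecomte1929/rolec | backend/services/identity_data_reconciliation.py | _pick_canonical_contact
-- ===== SOURCE A (Python) =====
-- from typing import Any, Dict, List, Optional, Tuple
--
-- def _pick_canonical_contact(group: List[Dict[str, Any]]) -> Tuple[Optional[Dict[str, Any]], str]:
--     """
--     Choose survivor: prefer row with linked_auth_user_id; then oldest created_at.
--     Returns (canonical_row or None, reason_for_manual).
--     """
--     linked_vals = {
--         (r.get("linked_auth_user_id") or "").strip()
--         for r in group
--         if (r.get("linked_auth_user_id") or "").strip()
--     }
--     if len(linked_vals) > 1: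
--         return None, "conflicting_linked_auth_user_id"
--
--     with_link = [r for r in group if (r.get("linked_auth_user_id") or "").strip()]
--     pool = with_link if with_link else group
--
--     def sort_key(r: Dict[str, Any]) -> Tuple[int, str]:
--         ca = (r.get("created_at") or "") or ""
--         return (0 if (r.get("linked_auth_user_id") or "").strip() else 1, ca)
--
--     pool_sorted = sorted(pool, key=sort_key)
--     return pool_sorted[0], ""
-- ===== SOURCE B (Python) =====
-- from typing import Any, Dict, List, Optional, Tuple
--
-- def _pick_canonical_contact(group: List[Dict[str, Any]]) -> Tuple[Optional[Dict[str, Any]], str]: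
--     """One pass: track the first row with the smallest (link-flag, created_at) key
--     and the set of distinct nonempty linked ids; no pool build, no sort."""
--     ids = set()
--     best = None
--     best_key = None
--     for r in group:
--         v = (r.get("linked_auth_user_id") or "").strip()
--         if v:
--             ids.add(v)
--         key = (0 if v else 1, r.get("created_at") or "")
--         if best_key is None or key < best_key:
--             best, best_key = r, key
--     if len(ids) > 1:
--         return None, "conflicting_linked_auth_user_id"
--     return best, ""
-- ===== Notes on version B (the rewrite author's own statement) =====
-- stated objective: alternative
-- what changed: Replaces the pool filter plus stable sort by a single pass that keeps the first row with the smallest (link-flag, created_at) key and collects the distinct linked ids in the same loop.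
-- outside the precondition, e.g. on _pick_canonical_contact([]): A raises IndexError, B returns (None, '')
import Mathlib
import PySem

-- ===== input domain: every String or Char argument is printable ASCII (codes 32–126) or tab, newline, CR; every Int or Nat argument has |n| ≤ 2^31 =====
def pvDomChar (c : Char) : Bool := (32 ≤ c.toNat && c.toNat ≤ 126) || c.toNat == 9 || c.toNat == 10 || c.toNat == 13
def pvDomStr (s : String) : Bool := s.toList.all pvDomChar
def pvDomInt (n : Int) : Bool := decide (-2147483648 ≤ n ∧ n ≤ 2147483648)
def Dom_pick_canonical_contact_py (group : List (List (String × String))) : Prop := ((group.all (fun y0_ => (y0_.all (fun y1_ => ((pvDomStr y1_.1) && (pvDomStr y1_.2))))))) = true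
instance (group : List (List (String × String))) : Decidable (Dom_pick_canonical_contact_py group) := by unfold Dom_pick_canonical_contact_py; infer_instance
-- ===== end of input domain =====

-- B replaces A's pool-filter + stable sort by a single pass keeping the first row with the
-- smallest (link-flag, created_at) key and the set of distinct linked ids (objective:
-- alternative decomposition, no sort). Return-value equivalence on nonempty groups.

-- r.get(k) or ""  (values are strings; missing key and empty string both yield "")
def pvGetD (r : List (String × String)) (k : String) : String :=
  match r.find? (fun kv => kv.1 == k) with
  | some kv => kv.2
  | none => ""

-- ===== PORT A =====
def pvLinked (r : List (String × String)) : Bool :=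
  !(PySem.Str.strip (pvGetD r "linked_auth_user_id") == "")

def pick_canonical_contact_py (group : List (List (String × String))) : (Option (List (String × String))) × String :=
  let linked_vals : PySem.Set String :=
    PySem.Set.ofList
      ((group.filter (fun r => pvLinked r)).map
        (fun r => PySem.Str.strip (pvGetD r "linked_auth_user_id")))
  if PySem.Set.len linked_vals > 1 then (none, "conflicting_linked_auth_user_id")
  else
    let with_link := group.filter (fun r => pvLinked r)
    let pool := if with_link = [] then group else with_link
    let pool_sorted := PySem.List.sorted2 pool
      (fun r => if pvLinked r then (0 : Int) else 1)
      (fun r => pvGetD r "created_at")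
    (PySem.List.pyGet? pool_sorted 0, "")

-- ===== PORT B =====
def pvAltStep (st : PySem.Set String × Option ((List (String × String)) × (Int × String)))
    (r : List (String × String)) :
    PySem.Set String × Option ((List (String × String)) × (Int × String)) :=
  let v := PySem.Str.strip (pvGetD r "linked_auth_user_id")
  let ids := if v == "" then st.1 else PySem.Set.add st.1 v
  let key : Int × String := ((if v == "" then 1 else 0), pvGetD r "created_at")
  let best :=
    match st.2 with
    | none => some (r, key)
    | some (b, bk) =>
        if key.1 < bk.1 ∨ (key.1 = bk.1 ∧ key.2 < bk.2) then some (r, key) else some (b, bk)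
  (ids, best)

def pick_canonical_contact_py_alt (group : List (List (String × String))) :
    (Option (List (String × String))) × String :=
  let st := group.foldl pvAltStep (PySem.Set.empty, none)
  if PySem.Set.len st.1 > 1 then (none, "conflicting_linked_auth_user_id")
  else (st.2.map (fun p => p.1), "")

-- ===== PRECONDITION & SPEC =====
-- Pre_ excludes only the empty group, on which A raises IndexError (sorted([])[0]).
def Pre_pick_canonical_contact_py (group : List (List (String × String))) : Prop := group ≠ []
instance (group : List (List (String × String))) : Decidable (Pre_pick_canonical_contact_py group) := by
  unfold Pre_pick_canonical_contact_py; infer_instance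

def pvWitness_pick_canonical_contact_py : (List (List (String × String))) :=
  [[("linked_auth_user_id", "u1"), ("created_at", "2020-01-01")]]

def Spec_pick_canonical_contact_py (group : List (List (String × String))) (out : (Option (List (String × String))) × String) : Prop := out = pick_canonical_contact_py_alt group
instance (group : List (List (String × String))) (out : (Option (List (String × String))) × String) : Decidable (Spec_pick_canonical_contact_py group out) := by unfold Spec_pick_canonical_contact_py; infer_instance

-- ===== CLAIM (what is proved, stated in full; the proofs are below) =====
def Claim_equal_pick_canonical_contact_py : Prop := ∀ (group : List (List (String × String))), Dom_pick_canonical_contact_py group → Pre_pick_canonical_contact_py group → Spec_pick_canonical_contact_py group (pick_canonical_contact_py group)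

-- ===== LEMMAS AND PROOFS =====

-- abbreviations used only by the proofs
def pvK1 (r : List (String × String)) : Int := if pvLinked r then 0 else 1
def pvK2 (r : List (String × String)) : String := pvGetD r "created_at"
def pvLt (a b : List (String × String)) : Bool :=
  decide (pvK1 a < pvK1 b) || (!decide (pvK1 b < pvK1 a) && decide (pvK2 a < pvK2 b))

def pvMinStep (m : Option (List (String × String))) (x : List (String × String)) :
    Option (List (String × String)) :=
  match m with
  | none => some x
  | some b => if pvLt x b then some x else some b

def pvIdsStep (s : PySem.Set String) (r : List (String × String)) : PySem.Set String :=
  let v := PySem.Str.strip (pvGetD r "linked_auth_user_id")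
  if v == "" then s else PySem.Set.add s v

def pvBestStep (o : Option ((List (String × String)) × (Int × String)))
    (r : List (String × String)) : Option ((List (String × String)) × (Int × String)) :=
  let v := PySem.Str.strip (pvGetD r "linked_auth_user_id")
  let key : Int × String := ((if v == "" then 1 else 0), pvGetD r "created_at")
  match o with
  | none => some (r, key)
  | some (b, bk) =>
      if key.1 < bk.1 ∨ (key.1 = bk.1 ∧ key.2 < bk.2) then some (r, key) else some (b, bk)

theorem pv_fold_split (l : List (List (String × String)))
    (s : PySem.Set String) (o : Option ((List (String × String)) × (Int × String))) :
    l.foldl pvAltStep (s, o) = (l.foldl pvIdsStep s, l.foldl pvBestStep o) := by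
  induction l generalizing s o with
  | nil => rfl
  | cons r t ih =>
      simp only [List.foldl_cons]
      rw [show pvAltStep (s, o) r = (pvIdsStep s r, pvBestStep o r) from rfl]
      exact ih _ _

theorem pv_ids_eq (l : List (List (String × String))) (s : PySem.Set String) :
    l.foldl pvIdsStep s
      = ((l.filter (fun r => pvLinked r)).map
          (fun r => PySem.Str.strip (pvGetD r "linked_auth_user_id"))).foldl PySem.Set.add s := by
  induction l generalizing s with
  | nil => rfl
  | cons r t ih =>
      by_cases h : PySem.Str.strip (pvGetD r "linked_auth_user_id") = ""
      · have hl : pvLinked r = false := by simp [pvLinked, h]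
        simp [List.foldl_cons, hl, pvIdsStep, h, ih]
      · have hl : pvLinked r = true := by simp [pvLinked, h]
        simp [List.foldl_cons, hl, pvIdsStep, h, ih]

-- B's cached tuple key components are pvK1 r / pvK2 r, and its tuple comparison is pvLt
theorem pv_key1_eq (r : List (String × String)) :
    (if PySem.Str.strip (pvGetD r "linked_auth_user_id") == "" then (1 : Int) else 0) = pvK1 r := by
  by_cases h : PySem.Str.strip (pvGetD r "linked_auth_user_id") = "" <;> simp [pvK1, pvLinked, h]

theorem pv_lt_iff (x b : List (String × String)) :
    (pvK1 x < pvK1 b ∨ (pvK1 x = pvK1 b ∧ pvK2 x < pvK2 b)) ↔ pvLt x b = true := by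
  simp only [pvLt, Bool.or_eq_true, Bool.and_eq_true, Bool.not_eq_true', decide_eq_true_eq,
    decide_eq_false_iff_not]
  by_cases hab : pvK1 x < pvK1 b
  · simp [hab]
  · by_cases hba : pvK1 b < pvK1 x
    · have hne : pvK1 x ≠ pvK1 b := by omega
      simp [hba, hne]
    · have heq : pvK1 x = pvK1 b := by omega
      simp [heq]

-- B's best-fold (with cached keys) computes the min-fold over rows
theorem pv_best_invariant (l : List (List (String × String))) (b : List (String × String)) :
    l.foldl pvBestStep (some (b, (pvK1 b, pvK2 b)))
      = (l.foldl pvMinStep (some b)).map (fun r => (r, (pvK1 r, pvK2 r))) := by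
  induction l generalizing b with
  | nil => rfl
  | cons r t ih =>
      simp only [List.foldl_cons]
      have hstep : pvBestStep (some (b, (pvK1 b, pvK2 b))) r
          = some ((if pvLt r b then r else b),
              (pvK1 (if pvLt r b then r else b), pvK2 (if pvLt r b then r else b))) := by
        simp only [pvBestStep, pv_key1_eq]
        rw [show pvGetD r "created_at" = pvK2 r from rfl]
        by_cases h : pvLt r b = true
        · rw [if_pos (by exact (pv_lt_iff r b).mpr h), if_pos h]
        · rw [if_neg (fun hc => h ((pv_lt_iff r b).mp hc)), if_neg h]
      rw [hstep, ih]
      have : pvMinStep (some b) r = some (if pvLt r b then r else b) := by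
        by_cases h' : pvLt r b = true <;> simp [pvMinStep, h']
      rw [this]

theorem pv_best_eq (l : List (List (String × String))) :
    (l.foldl pvBestStep none).map (fun p => p.1) = l.foldl pvMinStep none := by
  cases l with
  | nil => rfl
  | cons r t =>
      simp only [List.foldl_cons]
      have h0 : pvBestStep none r = some (r, (pvK1 r, pvK2 r)) := by
        simp only [pvBestStep, pv_key1_eq]
        rfl
      have h1 : pvMinStep none r = some r := rfl
      rw [h0, h1, pv_best_invariant]
      cases t.foldl pvMinStep (some r) <;> simp

-- head of the insertion sort = min-fold
theorem pv_head_foldl_insertBy (bf : List (String × String) → List (String × String) → Bool)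
    (l : List (List (String × String))) (acc : List (List (String × String))) :
    (l.foldl (fun a x => PySem.List.insertBy bf x a) acc).head?
      = l.foldl (fun (m : Option (List (String × String))) x =>
          match m with
          | none => some x
          | some m => if bf x m then some x else some m) acc.head? := by
  induction l generalizing acc with
  | nil => rfl
  | cons x t ih =>
      simp only [List.foldl_cons]
      rw [ih]
      congr 1
      cases acc with
      | nil => rfl
      | cons h rest =>
          show (PySem.List.insertBy bf x (h :: rest)).head? = _
          rw [show PySem.List.insertBy bf x (h :: rest)
              = if bf x h then x :: h :: rest else h :: PySem.List.insertBy bf x rest from rfl]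
          by_cases hb : bf x h <;> simp [hb]

-- sorted2 with our keys unfolds to the insertBy fold with pvLt
theorem pv_sorted2_eq (l : List (List (String × String))) :
    PySem.List.sorted2 l (fun r => if pvLinked r then (0 : Int) else 1)
        (fun r => pvGetD r "created_at")
      = l.foldl (fun a x => PySem.List.insertBy pvLt x a) [] := rfl

-- if m is linked, unlinked rows never replace it: min-fold ignores them
theorem pv_min_filter (l : List (List (String × String))) (m : List (String × String))
    (hm : pvLinked m = true) :
    l.foldl pvMinStep (some m) = (l.filter (fun r => pvLinked r)).foldl pvMinStep (some m) := by
  induction l generalizing m with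
  | nil => rfl
  | cons x t ih =>
      simp only [List.foldl_cons, List.filter_cons]
      by_cases hx : pvLinked x = true
      · rw [if_pos hx]
        simp only [List.foldl_cons]
        have hs : pvMinStep (some m) x = some (if pvLt x m then x else m) := by
          by_cases h' : pvLt x m = true <;> simp [pvMinStep, h']
        rw [hs]
        by_cases h : pvLt x m = true
        · rw [if_pos h]; exact ih x hx
        · rw [if_neg h]; exact ih m hm
      · rw [if_neg hx]
        have h1 : pvK1 x = 1 := by simp [pvK1, hx]
        have h2 : pvK1 m = 0 := by simp [pvK1, hm]
        have hlt : pvLt x m = false := by simp [pvLt, h1, h2]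
        have hs : pvMinStep (some m) x = some m := by simp [pvMinStep, hlt]
        rw [hs]; exact ih m hm

-- from an unlinked state, the min-fold lands on the filtered fold once a linked row exists
theorem pv_min_unlinked (l : List (List (String × String))) (m : List (String × String))
    (hm : pvLinked m = false) (hne : l.filter (fun r => pvLinked r) ≠ []) :
    l.foldl pvMinStep (some m) = (l.filter (fun r => pvLinked r)).foldl pvMinStep none := by
  induction l generalizing m with
  | nil => exact absurd rfl hne
  | cons x t ih =>
      simp only [List.foldl_cons, List.filter_cons]
      by_cases hx : pvLinked x = true
      · rw [if_pos hx]
        have h1 : pvK1 x = 0 := by simp [pvK1, hx]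
        have h2 : pvK1 m = 1 := by simp [pvK1, hm]
        have hlt : pvLt x m = true := by simp [pvLt, h1, h2]
        have hs : pvMinStep (some m) x = some x := by simp [pvMinStep, hlt]
        have hs2 : pvMinStep none x = some x := rfl
        simp only [List.foldl_cons]
        rw [hs, hs2, pv_min_filter t x hx]
      · rw [if_neg hx]
        have hne' : t.filter (fun r => pvLinked r) ≠ [] := by
          simpa [List.filter_cons, hx] using hne
        have hs : pvMinStep (some m) x = some (if pvLt x m then x else m) := by
          by_cases h' : pvLt x m = true <;> simp [pvMinStep, h']
        rw [hs]
        by_cases h : pvLt x m = true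
        · rw [if_pos h]; exact ih x (by simpa using hx) hne'
        · rw [if_neg h]; exact ih m hm hne'

-- min-fold over the pool equals min-fold over the whole group
theorem pv_min_pool (group : List (List (String × String))) :
    (if group.filter (fun r => pvLinked r) = [] then group
      else group.filter (fun r => pvLinked r)).foldl pvMinStep none
      = group.foldl pvMinStep none := by
  by_cases hf : group.filter (fun r => pvLinked r) = []
  · rw [if_pos hf]
  · rw [if_neg hf]
    cases group with
    | nil => simp at hf
    | cons x t =>
        by_cases hx : pvLinked x = true
        · simp only [List.filter_cons, hx, if_pos, List.foldl_cons]
          have h2 : pvMinStep none x = some x := rfl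
          rw [h2, pv_min_filter t x hx]
        · have hne' : t.filter (fun r => pvLinked r) ≠ [] := by
            simpa [List.filter_cons, hx] using hf
          simp only [List.filter_cons, hx, List.foldl_cons]
          have h2 : pvMinStep none x = some x := rfl
          rw [h2, pv_min_unlinked t x (by simpa using hx) hne']
          simp

theorem pv_pyGet_zero (l : List (List (String × String))) :
    PySem.List.pyGet? l 0 = l.head? := by
  cases l <;> simp [PySem.List.pyGet?, PySem.List.pyIdx?]

-- ===== VERDICT (by name: the statement is the Claim_ definition above) =====
theorem pick_canonical_contact_py_spec : Claim_equal_pick_canonical_contact_py := by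
  intro group _ _
  unfold Spec_pick_canonical_contact_py pick_canonical_contact_py pick_canonical_contact_py_alt
  rw [pv_fold_split]
  have hids : group.foldl pvIdsStep PySem.Set.empty
      = PySem.Set.ofList ((group.filter (fun r => pvLinked r)).map
          (fun r => PySem.Str.strip (pvGetD r "linked_auth_user_id"))) := by
    rw [pv_ids_eq]; rfl
  rw [hids]
  by_cases hc : PySem.Set.len (PySem.Set.ofList ((group.filter (fun r => pvLinked r)).map
      (fun r => PySem.Str.strip (pvGetD r "linked_auth_user_id")))) > 1
  · rw [if_pos hc, if_pos hc]
  · rw [if_neg hc, if_neg hc]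
    dsimp only
    rw [pv_sorted2_eq, pv_pyGet_zero, pv_head_foldl_insertBy, pv_best_eq]
    rw [show (fun (m : Option (List (String × String))) x =>
        match m with
        | none => some x
        | some m => if pvLt x m then some x else some m) = pvMinStep from rfl]
    rw [show ([] : List (List (String × String))).head? = (none : Option (List (String × String))) from rfl]
    rw [pv_min_pool]
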